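-- pv_equiv track=rewrite | github.com/Dai411/ISTRICI-tools | VelocityModel/vel_data_analysis.py | suggest_dimensions
-- ===== SOURCE A (Python) =====
-- def suggest_dimensions(data_len):
--     # Suggest common square-like dimensions
--     suggestions = []
--     for n in range(50, 2001):
--         if data_len % n == 0:
--             m = data_len // n
--             if 50 <= m <= 2000:
--                 suggestions.append((n, m))
--     return suggestions
-- ===== SOURCE B (Python) =====
-- def suggest_dimensions(data_len):
--     # Enumerate divisors d of data_len up to min(sqrt(data_len), 2000); each divisor d
--     # pairs with q = data_len // d, giving both (d, q) and (q, d) when in [50, 2000].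
--     pairs = []
--     d = 1
--     while d * d <= data_len and d <= 2000:
--         if data_len % d == 0:
--             q = data_len // d
--             if 50 <= d <= 2000 and 50 <= q <= 2000:
--                 pairs.append((d, q))
--             if q != d and 50 <= q <= 2000 and 50 <= d <= 2000:
--                 pairs.append((q, d))
--         d += 1
--     pairs.sort(key=lambda p: p[0])
--     return pairs
-- ===== Notes on version B (the rewrite author's own statement) =====
-- stated objective: alternative
-- what changed: Instead of trial-dividing data_len by every n in [50,2000], B enumerates divisors up to min(sqrt(data_len),2000), emits both members of each factor pair that lies in [50,2000]x[50,2000], and sorts by the first component.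
import Mathlib
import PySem

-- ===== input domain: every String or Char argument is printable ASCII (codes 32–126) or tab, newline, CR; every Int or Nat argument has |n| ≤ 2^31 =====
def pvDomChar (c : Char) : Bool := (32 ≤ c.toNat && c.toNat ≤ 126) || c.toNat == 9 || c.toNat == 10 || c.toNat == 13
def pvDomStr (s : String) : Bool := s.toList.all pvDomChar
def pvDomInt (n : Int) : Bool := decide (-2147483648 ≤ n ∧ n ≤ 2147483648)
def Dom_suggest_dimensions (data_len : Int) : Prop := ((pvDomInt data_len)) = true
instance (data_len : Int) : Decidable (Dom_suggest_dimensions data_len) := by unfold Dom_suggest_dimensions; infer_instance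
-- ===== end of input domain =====

-- B replaces A's trial division over every n in [50,2000] by divisor-pair enumeration up to
-- min(sqrt(data_len),2000) followed by a sort on the first component (objective: alternative).


-- ===== PORT A =====
def suggest_dimensions (data_len : Int) : List (Int × Int) :=
  (PySem.List.pyRange 50 2001 1).foldl
    (fun suggestions n =>
      if PySem.Int.mod data_len n = 0 then
        let m := PySem.Int.floordiv data_len n
        if 50 ≤ m ∧ m ≤ 2000 then suggestions ++ [(n, m)] else suggestions
      else suggestions) []

-- ===== PORT B =====
-- the while loop of Source B: d counts up while d*d <= data_len and d <= 2000
def sdLoop (data_len : Int) (d : Int) (pairs : List (Int × Int)) : List (Int × Int) :=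
  if h : d * d ≤ data_len ∧ d ≤ 2000 then
    let pairs' :=
      if PySem.Int.mod data_len d = 0 then
        let q := PySem.Int.floordiv data_len d
        let p1 := if 50 ≤ d ∧ d ≤ 2000 ∧ 50 ≤ q ∧ q ≤ 2000 then pairs ++ [(d, q)] else pairs
        if q ≠ d ∧ 50 ≤ q ∧ q ≤ 2000 ∧ 50 ≤ d ∧ d ≤ 2000 then p1 ++ [(q, d)] else p1
      else pairs
    sdLoop data_len (d + 1) pairs'
  else pairs
termination_by (2001 - d).toNat
decreasing_by
  have : d ≤ 2000 := h.2
  omega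

def suggest_dimensions_alt (data_len : Int) : List (Int × Int) :=
  PySem.List.sorted (sdLoop data_len 1 []) (fun p => p.1) false

-- ===== PRECONDITION & SPEC =====
def Spec_suggest_dimensions (data_len : Int) (out : List (Int × Int)) : Prop := out = suggest_dimensions_alt data_len
instance (data_len : Int) (out : List (Int × Int)) : Decidable (Spec_suggest_dimensions data_len out) := by unfold Spec_suggest_dimensions; infer_instance

-- ===== CLAIM (what is proved, stated in full; the proofs are below) =====
def Claim_equal_suggest_dimensions : Prop := ∀ (data_len : Int), Dom_suggest_dimensions data_len → Spec_suggest_dimensions data_len (suggest_dimensions data_len)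

-- ===== LEMMAS AND PROOFS =====

-- the factor pairs still to be produced from counter value d on
def sdCD (N d : Int) (p : Int × Int) : Prop :=
  d ≤ p.1 ∧ d ≤ p.2 ∧ 50 ≤ p.1 ∧ p.1 ≤ 2000 ∧ 50 ≤ p.2 ∧ p.2 ≤ 2000 ∧ p.1 * p.2 = N

theorem sdCD_step_nodvd (N d : Int) (_hd : 1 ≤ d) (hnd : ¬ d ∣ N) (p : Int × Int) :
    sdCD N d p ↔ sdCD N (d + 1) p := by
  unfold sdCD
  constructor
  · rintro ⟨h1, h2, h3, h4, h5, h6, h7⟩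
    have ha : p.1 ≠ d := fun he => hnd ⟨p.2, by rw [← h7, he]⟩
    have hb : p.2 ≠ d := fun he => hnd ⟨p.1, by rw [← h7, he]; ring⟩
    exact ⟨by omega, by omega, h3, h4, h5, h6, h7⟩
  · rintro ⟨h1, h2, h3, h4, h5, h6, h7⟩
    exact ⟨by omega, by omega, h3, h4, h5, h6, h7⟩

theorem sdCD_step (N d q : Int) (hd : 1 ≤ d) (hq : d * q = N) (hge : d ≤ q) (p : Int × Int) :
    sdCD N d p ↔ sdCD N (d + 1) p
      ∨ ((50 ≤ d ∧ d ≤ 2000 ∧ 50 ≤ q ∧ q ≤ 2000) ∧ p = (d, q))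
      ∨ ((q ≠ d ∧ 50 ≤ q ∧ q ≤ 2000 ∧ 50 ≤ d ∧ d ≤ 2000) ∧ p = (q, d)) := by
  obtain ⟨a, b⟩ := p
  unfold sdCD
  simp only [Prod.mk.injEq]
  constructor
  · rintro ⟨h1, h2, h3, h4, h5, h6, h7⟩
    by_cases hae : a = d
    · have hbq : b = q := by
        refine mul_left_cancel₀ (show d ≠ 0 by omega) ?_
        rw [hq, ← h7, hae]
      exact Or.inr (Or.inl ⟨⟨by omega, by omega, by omega, by omega⟩, hae, hbq⟩)
    · by_cases hbe : b = d
      · have haq : a = q := by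
          refine mul_left_cancel₀ (show d ≠ 0 by omega) ?_
          rw [hq, ← h7, hbe]; ring
        exact Or.inr (Or.inr ⟨⟨by omega, by omega, by omega, by omega, by omega⟩, haq, hbe⟩)
      · exact Or.inl ⟨by omega, by omega, h3, h4, h5, h6, h7⟩
  · rintro (⟨h1, h2, h3, h4, h5, h6, h7⟩ | ⟨⟨c1, c2, c3, c4⟩, rfl, rfl⟩ | ⟨⟨c0, c1, c2, c3, c4⟩, rfl, rfl⟩)
    · exact ⟨by omega, by omega, h3, h4, h5, h6, h7⟩
    · exact ⟨le_refl _, hge, by omega, by omega, by omega, by omega, hq⟩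
    · exact ⟨hge, le_refl _, by omega, by omega, by omega, by omega, by rw [mul_comm]; exact hq⟩

theorem sdLoop_inv (N : Int) :
    ∀ (n : Nat) (d : Int) (acc : List (Int × Int)), (2001 - d).toNat = n → 1 ≤ d → acc.Nodup →
      (∀ p ∈ acc, ¬(d ≤ p.1 ∧ d ≤ p.2 ∧ p.1 * p.2 = N)) →
      (sdLoop N d acc).Nodup ∧ ∀ p, (p ∈ sdLoop N d acc ↔ p ∈ acc ∨ sdCD N d p) := by
  intro n
  induction n with
  | zero =>
    intro d acc hm hd hnd hacc
    have hguard : ¬ (d * d ≤ N ∧ d ≤ 2000) := by omega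
    rw [sdLoop, dif_neg hguard]
    refine ⟨hnd, fun p => ⟨Or.inl, ?_⟩⟩
    rintro (h | ⟨h1, h2, h3, h4, h5, h6, h7⟩)
    · exact h
    · exfalso; omega
  | succ n ih =>
    intro d acc hm hd hnd hacc
    by_cases hguard : d * d ≤ N ∧ d ≤ 2000
    · rw [sdLoop, dif_pos hguard]
      simp only []
      by_cases hmod : PySem.Int.mod N d = 0
      · -- divisor case
        have hdvd : d ∣ N := (PySem.Int.mod_eq_zero_iff_dvd N d).mp hmod
        have hqdef : PySem.Int.floordiv N d = N / d := PySem.Int.floordiv_eq_ediv_of_pos (by omega)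
        set q : Int := PySem.Int.floordiv N d with hqd
        have hq : d * q = N := by rw [hqdef]; exact Int.mul_ediv_cancel' hdvd
        have hge : d ≤ q := le_of_mul_le_mul_left (show d * d ≤ d * q by omega) (show (0:Int) < d by omega)
        rw [if_pos hmod]
        have hfresh1 : ¬ ((d, q) ∈ acc) := fun hin => hacc _ hin ⟨le_refl d, hge, hq⟩
        have hfresh2 : ¬ ((q, d) ∈ acc) := fun hin =>
          hacc _ hin ⟨hge, le_refl d, by rw [mul_comm]; exact hq⟩
        have hstep := sdCD_step N d q (by omega) hq hge
        split_ifs with hco hci hci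
        · -- both pairs appended: acc' = (acc ++ [(d,q)]) ++ [(q,d)]
          have hne : ((d, q) : Int × Int) ≠ (q, d) := by
            intro he
            have : d = q := congrArg Prod.fst he
            exact hco.1 this.symm
          have nd1 : (acc ++ [(d, q)]).Nodup := by
            refine hnd.append (List.nodup_singleton _) ?_
            intro x hx hx2; rw [List.mem_singleton] at hx2; subst hx2; exact hfresh1 hx
          refine (ih (d + 1) _ (by omega) (by omega) ?_ ?_).imp id (fun hmem p => ?_)
          · refine nd1.append (List.nodup_singleton _) ?_
            intro x hx hx2; rw [List.mem_singleton] at hx2; subst hx2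
            rcases List.mem_append.mp hx with hx | hx
            · exact hfresh2 hx
            · rw [List.mem_singleton] at hx; exact hne hx.symm
          · intro p hp
            rcases List.mem_append.mp hp with hp | hp
            · rcases List.mem_append.mp hp with hp | hp
              · exact fun hcon => hacc p hp ⟨by omega, by omega, hcon.2.2⟩
              · rw [List.mem_singleton] at hp; subst hp
                rintro ⟨hx1, hx2, hx3⟩; simp only at hx1; omega
            · rw [List.mem_singleton] at hp; subst hp
              rintro ⟨hx1, hx2, hx3⟩; simp only at hx2; omega
          · rw [hmem p, hstep p]
            simp only [List.mem_append, List.mem_singleton]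
            tauto
        · -- only (q, d) appended
          refine (ih (d + 1) _ (by omega) (by omega) ?_ ?_).imp id (fun hmem p => ?_)
          · refine hnd.append (List.nodup_singleton _) ?_
            intro x hx hx2; rw [List.mem_singleton] at hx2; subst hx2; exact hfresh2 hx
          · intro p hp
            rcases List.mem_append.mp hp with hp | hp
            · exact fun hcon => hacc p hp ⟨by omega, by omega, hcon.2.2⟩
            · rw [List.mem_singleton] at hp; subst hp
              rintro ⟨hx1, hx2, hx3⟩; simp only at hx2; omega
          · rw [hmem p, hstep p]
            simp only [List.mem_append, List.mem_singleton]
            tauto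
        · -- only (d, q) appended
          refine (ih (d + 1) _ (by omega) (by omega) ?_ ?_).imp id (fun hmem p => ?_)
          · refine hnd.append (List.nodup_singleton _) ?_
            intro x hx hx2; rw [List.mem_singleton] at hx2; subst hx2; exact hfresh1 hx
          · intro p hp
            rcases List.mem_append.mp hp with hp | hp
            · exact fun hcon => hacc p hp ⟨by omega, by omega, hcon.2.2⟩
            · rw [List.mem_singleton] at hp; subst hp
              rintro ⟨hx1, hx2, hx3⟩; simp only at hx1; omega
          · rw [hmem p, hstep p]
            simp only [List.mem_append, List.mem_singleton]
            tauto
        · -- nothing appended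
          refine (ih (d + 1) acc (by omega) (by omega) hnd ?_).imp id (fun hmem p => ?_)
          · exact fun p hp hcon => hacc p hp ⟨by omega, by omega, hcon.2.2⟩
          · rw [hmem p, hstep p]
            tauto
      · rw [if_neg hmod]
        have hnd2 : ¬ d ∣ N := fun hdvd => hmod ((PySem.Int.mod_eq_zero_iff_dvd N d).mpr hdvd)
        refine (ih (d + 1) acc (by omega) (by omega) hnd ?_).imp id (fun hmem p => ?_)
        · exact fun p hp hcon => hacc p hp ⟨by omega, by omega, hcon.2.2⟩
        · rw [hmem p, sdCD_step_nodvd N d (by omega) hnd2 p]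
    · rw [sdLoop, dif_neg hguard]
      refine ⟨hnd, fun p => ⟨Or.inl, ?_⟩⟩
      rintro (h | ⟨h1, h2, h3, h4, h5, h6, h7⟩)
      · exact h
      · exfalso
        rcases not_and_or.mp hguard with hg | hg
        · have : d * d ≤ p.1 * p.2 :=
            mul_le_mul h1 h2 (by omega) (by omega)
          omega
        · omega

-- A's fold in filter-map form
theorem sd_A_eq (N : Int) :
    suggest_dimensions N =
      ((PySem.List.pyRange 50 2001 1).filter
          (fun n => decide (PySem.Int.mod N n = 0 ∧ 50 ≤ PySem.Int.floordiv N n ∧ PySem.Int.floordiv N n ≤ 2000))).map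
        (fun n => (n, PySem.Int.floordiv N n)) := by
  unfold suggest_dimensions
  have hbody : (fun (suggestions : List (Int × Int)) (n : Int) =>
      if PySem.Int.mod N n = 0 then
        let m := PySem.Int.floordiv N n
        if 50 ≤ m ∧ m ≤ 2000 then suggestions ++ [(n, m)] else suggestions
      else suggestions)
    = fun suggestions n =>
      if (fun n => decide (PySem.Int.mod N n = 0 ∧ 50 ≤ PySem.Int.floordiv N n ∧ PySem.Int.floordiv N n ≤ 2000)) n
      then suggestions ++ [(n, PySem.Int.floordiv N n)] else suggestions := by
    funext acc n
    by_cases h1 : PySem.Int.mod N n = 0 <;>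
      by_cases h2 : 50 ≤ PySem.Int.floordiv N n ∧ PySem.Int.floordiv N n ≤ 2000 <;>
      simp [h1, h2]
  rw [hbody, PySem.List.foldl_append_if]
  simp

theorem sd_mem_A (N : Int) (p : Int × Int) : p ∈ suggest_dimensions N ↔ sdCD N 1 p := by
  rw [sd_A_eq]
  simp only [List.mem_map, List.mem_filter, PySem.List.mem_pyRange_one, decide_eq_true_eq]
  constructor
  · rintro ⟨n, ⟨⟨hn1, hn2⟩, hm0, hm1, hm2⟩, rfl⟩
    have hdvd : n ∣ N := (PySem.Int.mod_eq_zero_iff_dvd N n).mp hm0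
    have hfd : n * PySem.Int.floordiv N n = N := by
      rw [PySem.Int.floordiv_eq_ediv_of_pos (by omega : (0:Int) < n)]
      exact Int.mul_ediv_cancel' hdvd
    exact ⟨by omega, by omega, by omega, by omega, by omega, by omega, hfd⟩
  · rintro ⟨h1, h2, h3, h4, h5, h6, h7⟩
    have hfd : PySem.Int.floordiv N p.1 = p.2 := by
      rw [PySem.Int.floordiv_eq_ediv_of_pos (by omega : (0:Int) < p.1), ← h7,
        Int.mul_ediv_cancel_left _ (by omega : p.1 ≠ 0)]
    refine ⟨p.1, ⟨⟨by omega, by omega⟩,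
      (PySem.Int.mod_eq_zero_iff_dvd N p.1).mpr ⟨p.2, h7.symm⟩, by omega, by omega⟩, ?_⟩
    rw [hfd]

theorem sd_pairwise_A (N : Int) : (suggest_dimensions N).Pairwise (fun p r => p.1 < r.1) := by
  rw [sd_A_eq]
  exact List.Pairwise.map _ (fun a b h => h)
    (List.Pairwise.filter _ (PySem.List.pairwise_lt_pyRange_one 50 2001))

theorem sd_nodup_A (N : Int) : (suggest_dimensions N).Nodup :=
  (sd_pairwise_A N).imp fun h he => absurd (congrArg Prod.fst he) (ne_of_lt h)

theorem suggest_dimensions_spec : Claim_equal_suggest_dimensions := by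
  intro N _hdom
  unfold Spec_suggest_dimensions suggest_dimensions_alt
  obtain ⟨hndB, hmemB⟩ :=
    sdLoop_inv N 2000 1 [] (by decide) (le_refl 1) List.nodup_nil (by simp)
  have hperm : (suggest_dimensions N).Perm (sdLoop N 1 []) := by
    rw [List.perm_ext_iff_of_nodup (sd_nodup_A N) hndB]
    intro p
    rw [sd_mem_A N p, hmemB p]
    simp
  exact (PySem.List.sorted_eq_of_perm_of_pairwise_lt _ _ _ hperm (sd_pairwise_A N)).symm
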